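-- pv_equiv track=rewrite | github.com/marvinbraga/ring | default/lib/outcome-inference/outcome_inference.py | analyze_todos
-- ===== SOURCE A (Python) =====
-- from typing import Dict, List, Optional, Tuple
--
-- def analyze_todos(todos: List[Dict]) -> Tuple[int, int, int, int]:
--     """Analyze todo list and return counts.
--
--     Returns:
--         Tuple of (total, completed, in_progress, pending)
--     """
--     if not todos:
--         return (0, 0, 0, 0)
--
--     total = len(todos)
--     completed = sum(1 for t in todos if t.get("status") == "completed")
--     in_progress = sum(1 for t in todos if t.get("status") == "in_progress")
--     pending = sum(1 for t in todos if t.get("status") == "pending")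
--
--     return (total, completed, in_progress, pending)
-- ===== SOURCE B (Python) =====
-- def analyze_todos(todos):
--     """Analyze todo list and return counts.
--
--     Returns:
--         Tuple of (total, completed, in_progress, pending)
--     """
--     counts = {}
--     for t in todos:
--         s = t.get("status")
--         counts[s] = counts.get(s, 0) + 1
--     return (len(todos),
--             counts.get("completed", 0),
--             counts.get("in_progress", 0),
--             counts.get("pending", 0))
-- ===== Notes on version B (the rewrite author's own statement) =====
-- stated objective: idiomatic
-- what changed: B makes one pass building a status frequency table and reads the three counts out of it, instead of A's three separate scans over the list.
import Mathlib
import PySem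

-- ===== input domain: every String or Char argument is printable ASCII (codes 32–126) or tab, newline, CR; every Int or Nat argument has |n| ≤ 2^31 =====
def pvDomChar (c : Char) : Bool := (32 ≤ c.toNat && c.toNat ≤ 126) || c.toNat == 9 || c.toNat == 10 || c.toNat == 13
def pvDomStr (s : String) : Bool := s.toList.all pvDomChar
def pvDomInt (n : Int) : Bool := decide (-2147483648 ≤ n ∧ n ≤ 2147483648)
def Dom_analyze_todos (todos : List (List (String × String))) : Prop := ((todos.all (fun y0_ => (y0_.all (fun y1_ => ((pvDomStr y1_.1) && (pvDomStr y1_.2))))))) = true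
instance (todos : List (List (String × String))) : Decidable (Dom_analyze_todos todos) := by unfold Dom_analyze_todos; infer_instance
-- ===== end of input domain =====

-- One honest line: B builds a status frequency table in one pass and reads the three
-- counts out of it, instead of A's three separate scans (idiomatic restructuring).

-- ===== PORT A =====
-- t.get("status"): first match in the association list (dict lookup)
def pvStatusA (t : List (String × String)) : Option String :=
  (t.find? (fun p => p.1 == "status")).map (·.2)

def analyze_todos (todos : List (List (String × String))) : Int × Int × Int × Int :=
  if todos = [] then (0, 0, 0, 0)
  else
    let total : Int := todos.length
    let completed : Int :=
      todos.foldl (fun acc t => if pvStatusA t == some "completed" then acc + 1 else acc) 0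
    let in_progress : Int :=
      todos.foldl (fun acc t => if pvStatusA t == some "in_progress" then acc + 1 else acc) 0
    let pending : Int :=
      todos.foldl (fun acc t => if pvStatusA t == some "pending" then acc + 1 else acc) 0
    (total, completed, in_progress, pending)

-- ===== PORT B =====
def pvStatusB (t : List (String × String)) : Option String :=
  (t.find? (fun p => p.1 == "status")).map (·.2)

def analyze_todos_alt (todos : List (List (String × String))) : Int × Int × Int × Int :=
  let counts : PySem.Dict (Option String) Int :=
    todos.foldl (fun d t => d.modify (pvStatusB t) 0 (· + 1)) PySem.Dict.empty
  ((todos.length : Int),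
   counts.getD (some "completed") 0,
   counts.getD (some "in_progress") 0,
   counts.getD (some "pending") 0)

-- ===== PRECONDITION & SPEC =====
def Spec_analyze_todos (todos : List (List (String × String))) (out : Int × Int × Int × Int) : Prop := out = analyze_todos_alt todos
instance (todos : List (List (String × String))) (out : Int × Int × Int × Int) : Decidable (Spec_analyze_todos todos out) := by unfold Spec_analyze_todos; infer_instance

-- ===== CLAIM (what is proved, stated in full; the proofs are below) =====
def Claim_equal_analyze_todos : Prop := ∀ (todos : List (List (String × String))), Dom_analyze_todos todos → Spec_analyze_todos todos (analyze_todos todos)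

-- ===== LEMMAS AND PROOFS =====

theorem foldl_if_count {α : Type} (p : α → Bool) :
    ∀ (l : List α) (acc : Int),
      l.foldl (fun acc t => if p t then acc + 1 else acc) acc = acc + (l.countP p : Int) := by
  intro l
  induction l with
  | nil => intro acc; simp
  | cons x xs ih =>
    intro acc
    simp only [List.foldl_cons, List.countP_cons, ih]
    by_cases h : p x = true
    · simp [h]; ring
    · simp [h]

theorem counts_getD_gen (g : List (String × String) → Option String) :
    ∀ (todos : List (List (String × String))) (d : PySem.Dict (Option String) Int)
      (k : Option String),
    (todos.foldl (fun d t => d.modify (g t) 0 (· + 1)) d).getD k 0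
      = d.getD k 0 + ((todos.map g).count k : Int) := by
  intro todos
  induction todos with
  | nil => intro d k; simp
  | cons x xs ih =>
    intro d k
    simp only [List.foldl_cons, ih, List.map_cons, List.count_cons]
    rw [PySem.Dict.getD_modify]
    by_cases h : k = g x
    · simp [h]; ring
    · have h' : (g x == k) = false := by
        simp; exact fun e => h e.symm
      simp [h, h']

theorem counts_getD (g : List (String × String) → Option String)
    (todos : List (List (String × String))) (k : Option String) :
    (todos.foldl (fun d t => d.modify (g t) 0 (· + 1)) PySem.Dict.empty).getD k 0
      = ((todos.map g).count k : Int) := by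
  rw [counts_getD_gen]
  simp [PySem.Dict.getD_empty]

theorem side_eq (todos : List (List (String × String))) (s : String) :
    todos.foldl (fun acc t => if pvStatusA t == some s then acc + 1 else acc) (0 : Int)
      = (todos.foldl (fun d t => d.modify (pvStatusB t) 0 (· + 1)) PySem.Dict.empty).getD (some s) 0 := by
  rw [counts_getD, foldl_if_count]
  have : pvStatusB = pvStatusA := rfl
  rw [this, List.count_eq_countP, List.countP_map]
  simp [Function.comp_def]

-- ===== VERDICT (by name: the statement is the Claim_ definition above) =====
theorem analyze_todos_spec : Claim_equal_analyze_todos := by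
  intro todos _
  unfold Spec_analyze_todos analyze_todos analyze_todos_alt
  by_cases h : todos = []
  · subst h; rfl
  · simp only [if_neg h, side_eq]
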